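-- pv_equiv track=rewrite | github.com/eirka96/Automation-of-model-construction-in-RS2-and-RS3 | Automatisering_RS2/source/filbehandling/make_objects.py | get_max_totdef
-- ===== SOURCE A (Python) =====
-- def get_max_totdef(idx_a, idx_b, data_sep):
--     if idx_a < idx_b:
--         indices = [i for i in range(idx_a, idx_b + 1, 1)]
--     else:
--         l1 = [i for i in range(0, idx_b + 1, 1)]
--         l2 = [i for i in range(idx_a, len(data_sep), 1)]
--         indices = l1 + l2
--
--     data = [data_sep[idx] for idx in indices]
--     data_exl_arc = [data_sep[idx][1] for idx in indices]
--     max_def = max(data_exl_arc)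
--     idx = data_exl_arc.index(max_def)
--     max_def_with_arc = data[idx]
--     return max_def, max_def_with_arc
-- ===== SOURCE B (Python) =====
-- def get_max_totdef(idx_a, idx_b, data_sep):
--     if idx_a < idx_b:
--         indices = range(idx_a, idx_b + 1)
--     else:
--         indices = list(range(0, idx_b + 1)) + list(range(idx_a, len(data_sep)))
--     best_val = None
--     best_row = None
--     for i in indices:
--         row = data_sep[i]
--         v = row[1]
--         if best_val is None or v > best_val:
--             best_val = v
--             best_row = row
--     if best_val is None:
--         raise ValueError("max() arg is an empty sequence")
--     return best_val, best_row
-- ===== Notes on version B (the rewrite author's own statement) =====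
-- stated objective: alternative
-- what changed: Replaces the three materialized lists plus max() plus .index() plus final lookup with a single fused pass over the index sequence that tracks the running best value and its row (strict comparison keeps the first maximum).
import Mathlib
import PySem

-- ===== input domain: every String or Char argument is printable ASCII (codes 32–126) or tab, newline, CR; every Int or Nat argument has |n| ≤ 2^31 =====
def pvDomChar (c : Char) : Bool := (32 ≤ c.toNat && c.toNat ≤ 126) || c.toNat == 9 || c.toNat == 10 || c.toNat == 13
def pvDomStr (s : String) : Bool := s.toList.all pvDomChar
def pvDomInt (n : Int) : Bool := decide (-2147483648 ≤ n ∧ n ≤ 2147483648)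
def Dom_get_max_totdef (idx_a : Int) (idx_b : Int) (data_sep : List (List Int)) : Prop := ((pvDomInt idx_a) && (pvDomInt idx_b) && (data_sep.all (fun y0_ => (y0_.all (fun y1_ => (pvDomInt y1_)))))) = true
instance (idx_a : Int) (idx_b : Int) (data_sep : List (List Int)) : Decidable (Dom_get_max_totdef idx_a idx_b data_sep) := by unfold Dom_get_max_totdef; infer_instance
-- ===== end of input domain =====

-- B fuses list-building, max() and .index() into one pass tracking the best value and its row (same return value).

-- ===== PORT A =====
def get_max_totdef (idx_a : Int) (idx_b : Int) (data_sep : List (List Int)) : Int × List Int :=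
  let indices : List Int :=
    if idx_a < idx_b then
      PySem.List.pyRange idx_a (idx_b + 1) 1
    else
      let l1 := PySem.List.pyRange 0 (idx_b + 1) 1
      let l2 := PySem.List.pyRange idx_a (data_sep.length : Int) 1
      l1 ++ l2
  let data := indices.map (fun idx => PySem.List.pyGetD data_sep idx [])
  let data_exl_arc := indices.map (fun idx => PySem.List.pyGetD (PySem.List.pyGetD data_sep idx []) 1 0)
  let max_def := (PySem.List.max? data_exl_arc (fun x => x)).getD 0
  let idx := (PySem.List.index? data_exl_arc max_def).getD 0
  let max_def_with_arc := data.getD idx []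
  (max_def, max_def_with_arc)

-- ===== PORT B =====
def get_max_totdef_alt (idx_a : Int) (idx_b : Int) (data_sep : List (List Int)) : Int × List Int :=
  let indices : List Int :=
    if idx_a < idx_b then
      PySem.List.pyRange idx_a (idx_b + 1) 1
    else
      PySem.List.pyRange 0 (idx_b + 1) 1 ++ PySem.List.pyRange idx_a (data_sep.length : Int) 1
  let best : Option (Int × List Int) :=
    indices.foldl (fun acc i =>
      let row := PySem.List.pyGetD data_sep i []
      let v := PySem.List.pyGetD row 1 0
      match acc with
      | none => some (v, row)
      | some (bv, br) => if v > bv then some (v, row) else some (bv, br)) none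
  match best with
  | some (bv, br) => (bv, br)
  | none => (0, [])   -- Python B raises ValueError here; excluded by Pre_

-- ===== PRECONDITION & SPEC =====
-- Pre_ = exactly where Python A returns: the index sequence is nonempty (else max([]) raises
-- ValueError), every index is in range (else IndexError) and every accessed row has a second entry.
def Pre_get_max_totdef (idx_a : Int) (idx_b : Int) (data_sep : List (List Int)) : Prop :=
  let n : Int := data_sep.length
  if idx_a < idx_b then
    (-n ≤ idx_a ∧ idx_b < n) ∧
    ∀ i ∈ PySem.List.pyRange idx_a (idx_b + 1) 1, 2 ≤ (PySem.List.pyGetD data_sep i []).length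
  else
    ((0 ≤ idx_b → idx_b < n) ∧ (idx_a < n → -n ≤ idx_a) ∧ (0 ≤ idx_b ∨ idx_a < n)) ∧
    (∀ i ∈ PySem.List.pyRange 0 (idx_b + 1) 1, 2 ≤ (PySem.List.pyGetD data_sep i []).length) ∧
    (∀ i ∈ PySem.List.pyRange idx_a n 1, 2 ≤ (PySem.List.pyGetD data_sep i []).length)
instance (idx_a : Int) (idx_b : Int) (data_sep : List (List Int)) : Decidable (Pre_get_max_totdef idx_a idx_b data_sep) := by unfold Pre_get_max_totdef; infer_instance

def pvWitness_get_max_totdef : Int × Int × List (List Int) := (0, 2, [[1, 5], [2, 9], [3, 9], [4, 0]])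

def Spec_get_max_totdef (idx_a : Int) (idx_b : Int) (data_sep : List (List Int)) (out : Int × List Int) : Prop := out = get_max_totdef_alt idx_a idx_b data_sep
instance (idx_a : Int) (idx_b : Int) (data_sep : List (List Int)) (out : Int × List Int) : Decidable (Spec_get_max_totdef idx_a idx_b data_sep out) := by unfold Spec_get_max_totdef; infer_instance

-- ===== CLAIM (what is proved, stated in full; the proofs are below) =====
def Claim_equal_get_max_totdef : Prop := ∀ (idx_a : Int) (idx_b : Int) (data_sep : List (List Int)), Dom_get_max_totdef idx_a idx_b data_sep → Pre_get_max_totdef idx_a idx_b data_sep → Spec_get_max_totdef idx_a idx_b data_sep (get_max_totdef idx_a idx_b data_sep)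

-- ===== LEMMAS AND PROOFS =====

-- B's loop body on a precomputed (value, row) pair
def pvStep (acc : Option (Int × List Int)) (p : Int × List Int) : Option (Int × List Int) :=
  match acc with
  | none => some p
  | some (bv, br) => if p.1 > bv then some p else some (bv, br)

def pvM2 (b p : Int × List Int) : Int × List Int := if p.1 > b.1 then p else b

lemma pvStep_some (ps : List (Int × List Int)) (b : Int × List Int) :
    ps.foldl pvStep (some b) = some (ps.foldl pvM2 b) := by
  induction ps generalizing b with
  | nil => rfl
  | cons q t ih =>
    simp only [List.foldl_cons]
    rw [show pvStep (some b) q = some (pvM2 b q) from by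
      simp [pvStep, pvM2]; split <;> simp_all]
    exact ih _

-- the running best value is the running max, and the best pair sits at the first
-- position of the list whose first component attains it
lemma pvRunSpec (t : List (Int × List Int)) (p : Int × List Int) :
    (t.foldl pvM2 p).1 = (t.map Prod.fst).foldl max p.1 ∧
    ∃ pre suf, p :: t = pre ++ (t.foldl pvM2 p) :: suf ∧
      ∀ q ∈ pre, q.1 < (t.foldl pvM2 p).1 := by
  induction t generalizing p with
  | nil => exact ⟨rfl, [], [], rfl, by simp⟩
  | cons q t ih =>
    simp only [List.foldl_cons, List.map_cons]
    by_cases h : q.1 > p.1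
    · have hm : pvM2 p q = q := by simp [pvM2, h]
      rw [hm]
      obtain ⟨h1, pre, suf, heq, hlt⟩ := ih q
      refine ⟨by rw [h1]; congr 1; omega, p :: pre, suf, by simp [heq], ?_⟩
      intro x hx
      rcases List.mem_cons.1 hx with rfl | hx
      · have : q.1 ≤ (t.map Prod.fst).foldl max q.1 := (PySem.List.le_foldl_max _ _).1
        rw [h1]; omega
      · exact hlt x hx
    · have hm : pvM2 p q = p := by simp [pvM2, h]
      rw [hm]
      obtain ⟨h1, pre, suf, heq, hlt⟩ := ih p
      refine ⟨by rw [h1]; congr 1; omega, ?_⟩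
      cases pre with
      | nil =>
        simp only [List.nil_append] at heq
        rw [List.cons.injEq] at heq
        refine ⟨[], q :: suf, ?_, by simp⟩
        rw [← heq.1, ← heq.2]
        simp
      | cons p' pre' =>
        simp only [List.cons_append, List.cons.injEq] at heq
        obtain ⟨rfl, heq2⟩ := heq
        have hgoal : p :: q :: t = (p :: q :: pre') ++ (t.foldl pvM2 p) :: suf := by
          conv_lhs => rw [heq2]
          simp
        refine ⟨p :: q :: pre', suf, hgoal, ?_⟩
        intro x hx
        have hp : p.1 < (t.foldl pvM2 p).1 := hlt p (by simp)
        rcases List.mem_cons.1 hx with rfl | hx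
        · exact hp
        rcases List.mem_cons.1 hx with rfl | hx
        · omega
        · exact hlt x (by simp [hx])

lemma getD_append_cons {α : Type} (l : List α) (a : α) (t : List α) (d : α) :
    (l ++ a :: t).getD l.length d = a := by
  induction l with
  | nil => rfl
  | cons x l ih => simp only [List.length_cons]; exact ih

-- the two ports agree for ANY index list (both read out-of-range cells as defaults),
-- proved by relating both to the pair list ps = indices.map f
lemma ports_agree (idx_a idx_b : Int) (data_sep : List (List Int)) :
    get_max_totdef idx_a idx_b data_sep = get_max_totdef_alt idx_a idx_b data_sep := by
  unfold get_max_totdef get_max_totdef_alt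
  simp only []
  set idxs : List Int :=
    if idx_a < idx_b then PySem.List.pyRange idx_a (idx_b + 1) 1
    else PySem.List.pyRange 0 (idx_b + 1) 1 ++ PySem.List.pyRange idx_a (data_sep.length : Int) 1 with hidxs
  set f : Int → Int × List Int := fun i =>
    (PySem.List.pyGetD (PySem.List.pyGetD data_sep i []) 1 0, PySem.List.pyGetD data_sep i []) with hf
  have hfold : idxs.foldl (fun acc i =>
      let row := PySem.List.pyGetD data_sep i []
      let v := PySem.List.pyGetD row 1 0
      match acc with
      | none => some (v, row)
      | some (bv, br) => if v > bv then some (v, row) else some (bv, br)) none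
      = (idxs.map f).foldl pvStep none := by
    rw [List.foldl_map]
    rfl
  have hmap1 : idxs.map (fun i => PySem.List.pyGetD (PySem.List.pyGetD data_sep i []) 1 0)
      = (idxs.map f).map Prod.fst := by simp [hf]
  have hmap2 : idxs.map (fun i => PySem.List.pyGetD data_sep i [])
      = (idxs.map f).map Prod.snd := by simp [hf]
  rw [hfold, hmap1, hmap2]
  cases hps : idxs.map f with
  | nil => simp [PySem.List.max?, PySem.List.index?]
  | cons p t =>
    rw [List.foldl_cons, show pvStep none p = some p from rfl, pvStep_some]
    obtain ⟨h1, pre, suf, heq, hlt⟩ := pvRunSpec t p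
    set r := t.foldl pvM2 p with hr
    simp only [List.map_cons]
    rw [PySem.List.max?_id_cons]
    simp only [Option.getD_some, ← h1]
    have hnotmem : r.1 ∉ pre.map Prod.fst := by
      intro hmem
      obtain ⟨q, hq, hq1⟩ := List.mem_map.1 hmem
      exact absurd hq1 (by have := hlt q hq; omega)
    have hmapeq : (p :: t).map Prod.fst = pre.map Prod.fst ++ r.1 :: suf.map Prod.fst := by
      rw [heq]; simp
    have hidx : PySem.List.index? ((p :: t).map Prod.fst) r.1 = some pre.length := by
      rw [hmapeq]
      rw [PySem.List.index?_eq_some_iff]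
      exact ⟨pre.map Prod.fst, suf.map Prod.fst, rfl, by simp, hnotmem⟩
    simp only [List.map_cons] at hidx
    rw [hidx]
    simp only [Option.getD_some]
    have hmapsnd : (p :: t).map Prod.snd = pre.map Prod.snd ++ r.2 :: suf.map Prod.snd := by
      rw [heq]; simp
    simp only [List.map_cons] at hmapsnd
    rw [hmapsnd, show pre.length = (pre.map Prod.snd).length from by simp,
      getD_append_cons]

-- ===== VERDICT (by name: the statement is the Claim_ definition above) =====
theorem get_max_totdef_spec : Claim_equal_get_max_totdef := by
  intro idx_a idx_b data_sep _ _
  exact ports_agree idx_a idx_b data_sep
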